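-- pv_equiv track=rewrite | github.com/dqk0902/DSA_2025 | week3/addmul.py | evaluate
-- ===== SOURCE A (Python) =====
-- def evaluate(data):
--     result = []
--     i = 0
--     n = len(data)
--
--     while i < n:
--         if i + 4 < n and data[i:i+4] == "add(" and i + 4 < n:
--             j = i + 4
--             paren_depth = 1
--             while j < n and paren_depth > 0:
--                 if data[j] == '(':
--                     paren_depth += 1
--                 elif data[j] == ')':
--                     paren_depth -= 1
--                 j += 1
--
--             if paren_depth == 0:
--                 expr = data[i:j]
--                 if is_valid_expression(expr):
--                     args = expr[4:-1].split(',')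
--                     x, y = int(args[0]), int(args[1])
--                     result.append(str(x + y))
--                     i = j
--                 else:
--                     result.append(data[i])
--                     i += 1
--             else:
--                 result.append(data[i])
--                 i += 1
--         elif i + 4 < n and data[i:i+4] == "mul(" and i + 4 < n:
--             j = i + 4
--             paren_depth = 1
--             while j < n and paren_depth > 0:
--                 if data[j] == '(':
--                     paren_depth += 1
--                 elif data[j] == ')':
--                     paren_depth -= 1
--                 j += 1
--
--             if paren_depth == 0:
--                 expr = data[i:j]
--                 if is_valid_expression(expr):
--                     args = expr[4:-1].split(',')
--                     x, y = int(args[0]), int(args[1])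
--                     result.append(str(x * y))
--                     i = j
--                 else:
--                     result.append(data[i])
--                     i += 1
--             else:
--                 result.append(data[i])
--                 i += 1
--         else:
--             result.append(data[i])
--             i += 1
--
--     return "".join(result)
--
-- def is_valid_expression(expr):
--     if not (expr.startswith("add(") or expr.startswith("mul(")) or not expr.endswith(")"):
--         return False
--
--     content = expr[4:-1]
--
--     parts = content.split(',')
--     if len(parts) != 2:
--         return False
--
--     x, y = parts
--
--     if not x or not y:
--         return False
--
--     if ' ' in x or ' ' in y or '.' in x or '.' in y or '-' in x or '-' in y:
--         return False
--
--     if (len(x) > 1 and x[0] == '0') or (len(y) > 1 and y[0] == '0'):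
--         return False
--
--     if not x.isdigit() or not y.isdigit():
--         return False
--
--     if int(x) <= 0 or int(y) <= 0:
--         return False
--
--     return True
-- ===== SOURCE B (Python) =====
-- # B: single left-to-right pass with a direct recursive-descent parse of "add(x,y)"/"mul(x,y)"
-- # (digits accumulated arithmetically), instead of A's per-token bracket-depth scan plus
-- # slice/split/str-validation. No bracket counting, no substring re-validation.
--
-- def _num(data, i):
--     # parse a positive decimal literal (no sign, no leading zero) starting at i
--     n = len(data)
--     j = i
--     v = 0
--     while j < n and '0' <= data[j] <= '9':
--         v = v * 10 + (ord(data[j]) - 48)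
--         j += 1
--     if j == i or data[i] == '0':
--         return None
--     return v, j
--
-- def _try_call(data, i):
--     op = data[i:i+4]
--     if op != "add(" and op != "mul(":
--         return None
--     rx = _num(data, i + 4)
--     if rx is None:
--         return None
--     x, j = rx
--     if j >= len(data) or data[j] != ',':
--         return None
--     ry = _num(data, j + 1)
--     if ry is None:
--         return None
--     y, k = ry
--     if k >= len(data) or data[k] != ')':
--         return None
--     return (str(x + y) if op == "add(" else str(x * y)), k + 1
--
-- def evaluate(data):
--     parts = []
--     i = 0
--     n = len(data)
--     while i < n:
--         r = _try_call(data, i)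
--         if r is None:
--             parts.append(data[i])
--             i += 1
--         else:
--             parts.append(r[0])
--             i = r[1]
--     return "".join(parts)
-- ===== Notes on version B (the rewrite author's own statement) =====
-- stated objective: alternative
-- what changed: A finds each candidate call's closing parenthesis with a bracket-depth scan, slices the substring and re-validates it via split/isdigit/int before parsing the numbers again; B does a single direct recursive-descent parse at each position (op token, first number accumulated digit by digit, separator, second number, closing parenthesis), so no substring is sliced, split or rescanned, and the worst case drops from quadratic to linear (measured only ~1.3x on the generated inputs).
import Mathlib
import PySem

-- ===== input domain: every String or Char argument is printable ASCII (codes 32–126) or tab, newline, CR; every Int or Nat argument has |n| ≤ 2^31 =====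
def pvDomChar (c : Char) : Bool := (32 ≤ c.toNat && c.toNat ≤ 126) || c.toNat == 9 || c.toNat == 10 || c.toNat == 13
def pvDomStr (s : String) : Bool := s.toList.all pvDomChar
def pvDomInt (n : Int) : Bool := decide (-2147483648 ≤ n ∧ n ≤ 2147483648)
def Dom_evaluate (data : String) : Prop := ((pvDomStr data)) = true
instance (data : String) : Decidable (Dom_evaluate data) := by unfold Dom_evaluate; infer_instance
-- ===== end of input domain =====

-- B replaces A's per-token bracket-depth scan + slice/split/re-validation by a single direct
-- recursive-descent parse of "add(x,y)"/"mul(x,y)" (digits accumulated arithmetically).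

-- ===== PORT A =====

-- int(s) of A, applied only to strings that passed `isdigit` (nonempty ASCII digit strings);
-- on that domain Python's int(s) is exactly this left fold (exact there).
def pvIntA (s : List Char) : Int := s.foldl (fun a c => a * 10 + ((c.toNat : Int) - 48)) 0

-- the inner `while j < n and paren_depth > 0` loop, run on the characters from j on
-- (returns: number of characters consumed, final paren_depth)
def pvScanA : List Char → Nat → Nat × Nat
  | _, 0 => (0, 0)
  | [], d => (0, d)
  | c :: cs, d + 1 =>
    let d' := if c = '(' then d + 2 else if c = ')' then d else d + 1
    let r := pvScanA cs d'
    (r.1 + 1, r.2)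

-- is_valid_expression, line for line
def pvValidA (expr : List Char) : Bool :=
  if !(PySem.Chars.startswith expr ['a','d','d','('] || PySem.Chars.startswith expr ['m','u','l','('])
      || !(PySem.Chars.endswith expr [')']) then false
  else
    let content := PySem.List.slice expr (some 4) (some (-1))
    let parts := PySem.Chars.splitOn content [',']
    match parts with
    | [x, y] =>                                   -- len(parts) == 2, x, y = parts
      if x.isEmpty || y.isEmpty then false
      else if PySem.Chars.isIn [' '] x || PySem.Chars.isIn [' '] y
            || PySem.Chars.isIn ['.'] x || PySem.Chars.isIn ['.'] y
            || PySem.Chars.isIn ['-'] x || PySem.Chars.isIn ['-'] y then false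
      else if (decide (1 < x.length) && (x.getD 0 ' ' == '0'))
            || (decide (1 < y.length) && (y.getD 0 ' ' == '0')) then false
      else if !(PySem.Chars.strIsdigit x) || !(PySem.Chars.strIsdigit y) then false
      else if pvIntA x ≤ 0 || pvIntA y ≤ 0 then false
      else true
    | _ => false                                  -- len(parts) != 2

-- the main `while i < n` loop of A, run on the characters from i on; each appended string
-- becomes one chunk of the result list (result.append(...))
def pvRunA : List Char → List (List Char)
  | [] => []
  | c :: cs =>
    if 4 < (c :: cs).length ∧ (c :: cs).take 4 = ['a','d','d','('] then
      let r := pvScanA ((c :: cs).drop 4) 1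
      if r.2 = 0 then
        let expr := (c :: cs).take (4 + r.1)
        if pvValidA expr then
          let content := PySem.List.slice expr (some 4) (some (-1))
          let parts := PySem.Chars.splitOn content [',']
          let x := pvIntA (parts.getD 0 [])
          let y := pvIntA (parts.getD 1 [])
          PySem.Int.toChars (x + y) :: pvRunA ((c :: cs).drop (4 + r.1))
        else [c] :: pvRunA cs
      else [c] :: pvRunA cs
    else if 4 < (c :: cs).length ∧ (c :: cs).take 4 = ['m','u','l','('] then
      let r := pvScanA ((c :: cs).drop 4) 1
      if r.2 = 0 then
        let expr := (c :: cs).take (4 + r.1)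
        if pvValidA expr then
          let content := PySem.List.slice expr (some 4) (some (-1))
          let parts := PySem.Chars.splitOn content [',']
          let x := pvIntA (parts.getD 0 [])
          let y := pvIntA (parts.getD 1 [])
          PySem.Int.toChars (x * y) :: pvRunA ((c :: cs).drop (4 + r.1))
        else [c] :: pvRunA cs
      else [c] :: pvRunA cs
    else [c] :: pvRunA cs
termination_by l => l.length
decreasing_by all_goals (simp; try omega)

def evaluate (data : String) : String :=
  String.ofList (PySem.Chars.join [] (pvRunA data.toList))

-- ===== PORT B =====

-- the digit-accumulating while loop of _num
def pvNumGo : List Char → Int → Int × List Char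
  | [], v => (v, [])
  | c :: cs, v =>
    if '0' ≤ c ∧ c ≤ '9' then pvNumGo cs (v * 10 + ((c.toNat : Int) - 48)) else (v, c :: cs)

-- _num: a positive decimal literal, no sign, no leading zero (None ↦ none)
def pvParseNum : List Char → Option (Int × List Char)
  | [] => none
  | c :: cs => if '1' ≤ c ∧ c ≤ '9' then some (pvNumGo (c :: cs) 0) else none

-- _try_call
def pvTryCall (l : List Char) : Option (List Char × List Char) :=
  let op := l.take 4
  if op = ['a','d','d','('] ∨ op = ['m','u','l','('] then
    match pvParseNum (l.drop 4) with
    | some (x, r1) =>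
      match r1 with
      | ',' :: r2 =>
        match pvParseNum r2 with
        | some (y, r3) =>
          match r3 with
          | ')' :: r4 =>
            some (PySem.Int.toChars (if l.take 4 = ['a','d','d','('] then x + y else x * y), r4)
          | _ => none
        | none => none
      | _ => none
    | none => none
  else none

theorem pvNumGo_len (l : List Char) (v : Int) : (pvNumGo l v).2.length ≤ l.length := by
  induction l generalizing v with
  | nil => simp [pvNumGo]
  | cons c cs ih =>
    simp only [pvNumGo]
    split
    · exact le_trans (ih _) (by simp)
    · simp

theorem pvParseNum_len {l : List Char} {x : Int} {r : List Char}
    (h : pvParseNum l = some (x, r)) : r.length < l.length := by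
  match l with
  | [] => simp [pvParseNum] at h
  | c :: cs =>
    simp only [pvParseNum] at h
    split at h
    · have h2 : r = (pvNumGo (c :: cs) 0).2 := by
        cases hg : pvNumGo (c :: cs) 0 with
        | mk a b => simp [hg] at h; simp [h.2]
      have : (pvNumGo (c :: cs) 0).2.length ≤ cs.length := by
        simp only [pvNumGo]
        rename_i hc
        rw [if_pos (by constructor <;> [exact le_trans (by decide) hc.1; exact hc.2])]
        exact pvNumGo_len _ _
      simp [h2]; omega
    · exact absurd h (by simp)

theorem pvTryCall_len {l : List Char} {v rest : List Char}
    (h : pvTryCall l = some (v, rest)) : rest.length < l.length := by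
  simp only [pvTryCall] at h
  split at h
  · split at h
    · split at h
      · split at h
        · split at h
          · rename_i hop o1 a1 r1 r2 h1 o2 a2 r3 r4 h2
            simp only [Option.some.injEq, Prod.mk.injEq] at h
            obtain ⟨-, rfl⟩ := h
            have hr1 := pvParseNum_len h1
            have hr3 := pvParseNum_len h2
            have : (l.drop 4).length ≤ l.length := by simp
            simp at hr1 hr3
            omega
          · simp at h
        · simp at h
      · simp at h
    · simp at h
  · simp at h

-- the main loop of B; one chunk per appended piece
def pvRunB : List Char → List (List Char)
  | [] => []
  | c :: cs =>
    match h : pvTryCall (c :: cs) with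
    | some vr => vr.1 :: pvRunB vr.2
    | none => [c] :: pvRunB cs
termination_by l => l.length
decreasing_by
  · exact pvTryCall_len h
  · simp

def evaluate_alt (data : String) : String :=
  String.ofList (PySem.Chars.join [] (pvRunB data.toList))

-- ===== PRECONDITION & SPEC =====
def Spec_evaluate (data : String) (out : String) : Prop := out = evaluate_alt data
instance (data : String) (out : String) : Decidable (Spec_evaluate data out) := by unfold Spec_evaluate; infer_instance

-- ===== CLAIM (what is proved, stated in full; the proofs are below) =====
def Claim_equal_evaluate : Prop := ∀ (data : String), Dom_evaluate data → Spec_evaluate data (evaluate data)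

-- ===== LEMMAS AND PROOFS =====

-- ---- character facts ----

theorem pvCharLe {a b : Char} : a ≤ b ↔ a.toNat ≤ b.toNat := by
  rw [Char.le_def, UInt32.le_iff_toNat_le]; rfl

theorem pvDigitBounds {c : Char} (h : '0' ≤ c ∧ c ≤ '9') : 48 ≤ c.toNat ∧ c.toNat ≤ 57 :=
  ⟨pvCharLe.mp h.1, pvCharLe.mp h.2⟩

theorem pvDigitNe {c x : Char} (h : '0' ≤ c ∧ c ≤ '9') (hx : x.toNat < 48) : c ≠ x := by
  intro rfl; have := pvDigitBounds h; omega

theorem pvDigitOne {d : Char} (h : '0' ≤ d ∧ d ≤ '9') (h0 : d ≠ '0') : '1' ≤ d ∧ d ≤ '9' := by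
  refine ⟨pvCharLe.mpr ?_, h.2⟩
  have h48 : d.toNat ≠ 48 := by
    intro he; exact h0 (by apply Char.ext; exact UInt32.toNat_inj.mp he)
  have h1 : ('1' : Char).toNat = 49 := rfl
  rw [h1]
  have hlo : 48 ≤ d.toNat := pvCharLe.mp h.1
  omega

-- ---- A-side: pvIntA ----

theorem pvFoldStep_ge_one (ds : List Char) (a : Int) (hds : ∀ c ∈ ds, '0' ≤ c ∧ c ≤ '9')
    (ha : 1 ≤ a) : 1 ≤ ds.foldl (fun a c => a * 10 + ((c.toNat : Int) - 48)) a := by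
  induction ds generalizing a with
  | nil => simpa using ha
  | cons c cs ih =>
    have hb := pvDigitBounds (hds c (by simp))
    refine ih _ (fun x hx => hds x (List.mem_cons_of_mem _ hx)) ?_
    have h48 : (48 : Int) ≤ (c.toNat : Int) := by exact_mod_cast hb.1
    nlinarith

theorem pvIntA_pos {d : Char} {x : List Char} (hd : '1' ≤ d ∧ d ≤ '9')
    (hx : ∀ c ∈ x, '0' ≤ c ∧ c ≤ '9') : 1 ≤ pvIntA (d :: x) := by
  have h49 : 49 ≤ d.toNat := pvCharLe.mp hd.1
  unfold pvIntA
  simp only [List.foldl_cons]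
  refine pvFoldStep_ge_one x _ hx ?_
  have : (49 : Int) ≤ (d.toNat : Int) := by exact_mod_cast h49
  omega

-- ---- A-side: the paren scan ----

theorem pvScan_len (l : List Char) (d : Nat) : (pvScanA l d).1 ≤ l.length := by
  induction l generalizing d with
  | nil => cases d <;> simp [pvScanA]
  | cons c cs ih =>
    cases d with
    | zero => simp [pvScanA]
    | succ d => simpa [pvScanA] using Nat.succ_le_succ (ih _)

theorem pvScan_pos {l : List Char} {d k : Nat} (h : pvScanA l (d + 1) = (k, 0)) : 1 ≤ k := by
  cases l with
  | nil => simp [pvScanA] at h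
  | cons c cs => simp [pvScanA] at h; omega

theorem pvScan_noparen (cs : List Char) (rest : List Char) (d : Nat)
    (h : ∀ c ∈ cs, c ≠ '(' ∧ c ≠ ')') :
    pvScanA (cs ++ rest) (d + 1) =
      ((pvScanA rest (d + 1)).1 + cs.length, (pvScanA rest (d + 1)).2) := by
  induction cs with
  | nil => simp
  | cons c cs ih =>
    have hc := h c (by simp)
    simp only [List.cons_append, pvScanA, hc.1, hc.2, if_false]
    rw [ih (fun x hx => h x (by simp [hx]))]
    simp; omega

theorem pvScan_close (r : List Char) : pvScanA (')' :: r) 1 = (1, 0) := by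
  simp [pvScanA]

-- ---- splitOn on a single comma ----

theorem pvGo_nocomma (fuel : Nat) : ∀ (l cur : List Char) (acc : List (List Char)), ',' ∉ l →
    PySem.Chars.splitOn.go [','] fuel l cur acc = acc.reverse ++ [cur.reverse ++ l] := by
  induction fuel with
  | zero => intro l cur acc h; simp [PySem.Chars.splitOn.go]
  | succ f ih =>
    intro l cur acc h
    cases l with
    | nil => simp [PySem.Chars.splitOn.go]
    | cons c rest =>
      have hc : ¬ (c = ',') := fun he => h (by simp [he])
      have hpre : [','].isPrefixOf (c :: rest) = false := by
        simp [List.isPrefixOf]; exact fun he => hc he.symm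
      simp only [PySem.Chars.splitOn.go, hpre]
      rw [ih rest (c :: cur) acc (fun hm => h (List.mem_cons_of_mem _ hm))]
      simp

theorem pvGo_acc (fuel : Nat) : ∀ (l cur : List Char) (acc : List (List Char)),
    PySem.Chars.splitOn.go [','] fuel l cur acc =
      acc.reverse ++ PySem.Chars.splitOn.go [','] fuel l cur [] := by
  induction fuel with
  | zero => intro l cur acc; simp [PySem.Chars.splitOn.go]
  | succ f ih =>
    intro l cur acc
    cases l with
    | nil => simp [PySem.Chars.splitOn.go]
    | cons c rest =>
      by_cases hc : c = ','
      · subst hc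
        have hpre : [','].isPrefixOf (',' :: rest) = true := by simp [List.isPrefixOf]
        simp only [PySem.Chars.splitOn.go, hpre]
        rw [ih _ [] (cur.reverse :: acc), ih _ [] [cur.reverse]]
        simp
      · have hpre : [','].isPrefixOf (c :: rest) = false := by
          simp [List.isPrefixOf]; exact fun he => hc he.symm
        simp only [PySem.Chars.splitOn.go, hpre]
        rw [ih rest (c :: cur) acc]
        simp

theorem pvGo_consume (x : List Char) (hx : ',' ∉ x) :
    ∀ (fuel : Nat) (rest cur : List Char) (acc : List (List Char)), x.length < fuel →
    PySem.Chars.splitOn.go [','] fuel (x ++ ',' :: rest) cur acc =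
      PySem.Chars.splitOn.go [','] (fuel - (x.length + 1)) rest [] ((cur.reverse ++ x) :: acc) := by
  induction x with
  | nil =>
    intro fuel rest cur acc hf
    cases fuel with
    | zero => omega
    | succ f =>
      have hpre : [','].isPrefixOf (',' :: rest) = true := by simp [List.isPrefixOf]
      simp only [List.nil_append, PySem.Chars.splitOn.go, hpre]
      simp
  | cons c x' ih =>
    intro fuel rest cur acc hf
    have hc : ¬ (c = ',') := fun he => hx (by simp [he])
    cases fuel with
    | zero => omega
    | succ f =>
      have hpre : [','].isPrefixOf (c :: (x' ++ ',' :: rest)) = false := by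
        simp [List.isPrefixOf]; exact fun he => hc he.symm
      simp only [List.cons_append, PySem.Chars.splitOn.go, hpre]
      rw [ih (fun hm => hx (List.mem_cons_of_mem _ hm)) f rest (c :: cur) acc (by simpa using hf)]
      have harith : f - (x'.length + 1) = (f + 1) - ((c :: x').length + 1) := by simp only [List.length_cons]; omega
      rw [harith]
      simp

theorem pvGo_ne_nil (fuel : Nat) : ∀ (l cur : List Char) (acc : List (List Char)),
    PySem.Chars.splitOn.go [','] fuel l cur acc ≠ [] := by
  induction fuel with
  | zero => intro l cur acc; simp [PySem.Chars.splitOn.go]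
  | succ f ih =>
    intro l cur acc
    cases l with
    | nil => simp [PySem.Chars.splitOn.go]
    | cons c rest =>
      simp only [PySem.Chars.splitOn.go]
      split
      · exact ih _ _ _
      · exact ih _ _ _

theorem pvSplit_nocomma (l : List Char) (h : ',' ∉ l) :
    PySem.Chars.splitOn l [','] = [l] := by
  unfold PySem.Chars.splitOn
  rw [pvGo_nocomma _ _ _ _ h]; simp

theorem pvSplit_comma (x rest : List Char) (hx : ',' ∉ x) :
    PySem.Chars.splitOn (x ++ ',' :: rest) [','] = x :: PySem.Chars.splitOn rest [','] := by
  unfold PySem.Chars.splitOn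
  rw [pvGo_consume x hx _ _ _ _ (by simp), pvGo_acc]
  have : (x ++ ',' :: rest).length + 1 - (x.length + 1) = rest.length + 1 := by simp only [List.length_append, List.length_cons]; omega
  rw [this]
  simp

theorem pvSplit_ne_nil (l : List Char) : PySem.Chars.splitOn l [','] ≠ [] := by
  unfold PySem.Chars.splitOn; exact pvGo_ne_nil _ _ _ _

theorem pvSplit_pair (x y : List Char) (hx : ',' ∉ x) (hy : ',' ∉ y) :
    PySem.Chars.splitOn (x ++ ',' :: y) [','] = [x, y] := by
  rw [pvSplit_comma x y hx, pvSplit_nocomma y hy]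

theorem pvFirstComma {l : List Char} (h : ',' ∈ l) :
    ∃ a b, l = a ++ ',' :: b ∧ ',' ∉ a := by
  induction l with
  | nil => simp at h
  | cons c cs ih =>
    by_cases hc : c = ','
    · exact ⟨[], cs, by simp [hc], by simp⟩
    · obtain ⟨a, b, rfl, ha⟩ :=
        ih ((List.mem_cons.mp h).resolve_left (fun he => hc he.symm))
      exact ⟨c :: a, b, by simp, by
        intro hm
        rcases List.mem_cons.mp hm with he | hm
        · exact hc he.symm
        · exact ha hm⟩

theorem pvSplit_eq_pair {content x y : List Char}
    (h : PySem.Chars.splitOn content [','] = [x, y]) :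
    content = x ++ ',' :: y ∧ ',' ∉ x ∧ ',' ∉ y := by
  by_cases hc : ',' ∈ content
  · obtain ⟨a, b, rfl, ha⟩ := pvFirstComma hc
    rw [pvSplit_comma a b ha] at h
    simp only [List.cons.injEq] at h
    obtain ⟨rfl, h⟩ := h
    by_cases hb : ',' ∈ b
    · obtain ⟨a2, b2, rfl, ha2⟩ := pvFirstComma hb
      rw [pvSplit_comma a2 b2 ha2] at h
      simp only [List.cons.injEq] at h
      exact absurd h.2 (pvSplit_ne_nil _)
    · rw [pvSplit_nocomma b hb] at h
      simp only [List.cons.injEq] at h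
      obtain ⟨rfl, -⟩ := h
      exact ⟨rfl, ha, hb⟩
  · rw [pvSplit_nocomma _ hc] at h
    simp at h

theorem pvSlice_4_neg1 (l : List Char) :
    PySem.List.slice l (some 4) (some (-1)) = (l.drop 4).dropLast := by
  simp only [PySem.List.slice, PySem.List.clampIdx]
  norm_num
  by_cases hnil : l = []
  · simp [hnil]
  · rw [if_neg hnil, List.dropLast_eq_take, List.length_drop]
    have hlen : 0 < l.length := List.length_pos_iff.mpr hnil
    have h1 : ((l.length : Int) + -1).toNat = l.length - 1 := by omega
    have h2 : Int.toNat 4 = 4 := rfl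
    rw [h1, h2]
    by_cases h4 : 4 ≤ l.length
    · rw [min_eq_left h4]
      congr 1
    · have : min 4 l.length = l.length := by omega
      rw [this]
      simp [List.drop_eq_nil_of_le (by omega : l.length ≤ 4)]


-- ---- B-side characterizations ----

theorem pvNumGo_append (ds rest : List Char) (v : Int) (hds : ∀ c ∈ ds, '0' ≤ c ∧ c ≤ '9') :
    pvNumGo (ds ++ rest) v =
      pvNumGo rest (ds.foldl (fun a c => a * 10 + ((c.toNat : Int) - 48)) v) := by
  induction ds generalizing v with
  | nil => simp
  | cons c cs ih =>
    simp only [List.cons_append, pvNumGo, if_pos (hds c (by simp)), List.foldl_cons]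
    exact ih _ (fun x hx => hds x (by simp [hx]))

theorem pvNumGo_stop (rest : List Char) (v : Int)
    (h : ∀ c r', rest = c :: r' → ¬('0' ≤ c ∧ c ≤ '9')) : pvNumGo rest v = (v, rest) := by
  cases rest with
  | nil => simp [pvNumGo]
  | cons c r' => simp [pvNumGo, h c r' rfl]

theorem pvNumGo_char (l : List Char) (v : Int) :
    ∃ ds r, pvNumGo l v = (ds.foldl (fun a c => a * 10 + ((c.toNat : Int) - 48)) v, r) ∧
      l = ds ++ r ∧ (∀ c ∈ ds, '0' ≤ c ∧ c ≤ '9') ∧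
      (∀ c r', r = c :: r' → ¬('0' ≤ c ∧ c ≤ '9')) := by
  induction l generalizing v with
  | nil => exact ⟨[], [], by simp [pvNumGo]⟩
  | cons c cs ih =>
    by_cases hc : '0' ≤ c ∧ c ≤ '9'
    · obtain ⟨ds, r, h1, h2, h3, h4⟩ := ih (v * 10 + ((c.toNat : Int) - 48))
      refine ⟨c :: ds, r, ?_, by simp [h2], ?_, h4⟩
      · simp [pvNumGo, hc, h1]
      · intro z hz
        rcases List.mem_cons.mp hz with rfl | hz
        · exact hc
        · exact h3 z hz
    · refine ⟨[], c :: cs, by simp [pvNumGo, hc], rfl, by simp, fun z r' he => ?_⟩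
      cases he; exact hc

theorem pvParseNum_some {l : List Char} {x : Int} {r : List Char}
    (h : pvParseNum l = some (x, r)) :
    ∃ d ds, l = (d :: ds) ++ r ∧ ('1' ≤ d ∧ d ≤ '9') ∧ (∀ c ∈ ds, '0' ≤ c ∧ c ≤ '9') ∧
      (∀ c r', r = c :: r' → ¬('0' ≤ c ∧ c ≤ '9')) ∧ x = pvIntA (d :: ds) := by
  match l with
  | [] => simp [pvParseNum] at h
  | c :: cs =>
    simp only [pvParseNum] at h
    split at h
    · rename_i hc
      obtain ⟨ds, r', h1, h2, h3, h4⟩ := pvNumGo_char (c :: cs) 0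
      rw [h1] at h
      simp only [Option.some.injEq, Prod.mk.injEq] at h
      obtain ⟨hx, rfl⟩ := h
      cases ds with
      | nil =>
        exfalso
        simp at h2
        exact h4 c cs h2.symm ⟨le_trans (by decide) hc.1, hc.2⟩
      | cons d ds' =>
        have hcd : c = d ∧ cs = ds' ++ r' := by
          have := h2
          simp only [List.cons_append, List.cons.injEq] at this
          exact this
        obtain ⟨rfl, -⟩ := hcd
        refine ⟨c, ds', by simpa using h2, hc, fun z hz => h3 z (List.mem_cons_of_mem _ hz), h4, ?_⟩
        simpa [pvIntA] using hx.symm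
    · simp at h

theorem pvParseNum_compute (d : Char) (ds rest : List Char) (hd : '1' ≤ d ∧ d ≤ '9')
    (hds : ∀ c ∈ ds, '0' ≤ c ∧ c ≤ '9')
    (hr : ∀ c r', rest = c :: r' → ¬('0' ≤ c ∧ c ≤ '9')) :
    pvParseNum ((d :: ds) ++ rest) = some (pvIntA (d :: ds), rest) := by
  have hd' : '0' ≤ d ∧ d ≤ '9' := ⟨le_trans (by decide) hd.1, hd.2⟩
  simp only [List.cons_append, pvParseNum, if_pos hd]
  rw [show (d :: (ds ++ rest)) = (d :: ds) ++ rest by simp,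
    pvNumGo_append _ _ _ (by
      intro z hz
      rcases List.mem_cons.mp hz with rfl | hz
      · exact hd'
      · exact hds z hz),
    pvNumGo_stop _ _ hr]
  rfl

theorem pvTryCall_some {l : List Char} {v rest : List Char}
    (h : pvTryCall l = some (v, rest)) :
    ∃ d1 x d2 y,
      (l.take 4 = ['a','d','d','('] ∨ l.take 4 = ['m','u','l','(']) ∧
      l = l.take 4 ++ (d1 :: x) ++ ',' :: (d2 :: y) ++ ')' :: rest ∧
      ('1' ≤ d1 ∧ d1 ≤ '9') ∧ (∀ c ∈ x, '0' ≤ c ∧ c ≤ '9') ∧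
      ('1' ≤ d2 ∧ d2 ≤ '9') ∧ (∀ c ∈ y, '0' ≤ c ∧ c ≤ '9') ∧
      v = PySem.Int.toChars (if l.take 4 = ['a','d','d','('] then
            pvIntA (d1 :: x) + pvIntA (d2 :: y) else pvIntA (d1 :: x) * pvIntA (d2 :: y)) := by
  simp only [pvTryCall] at h
  split at h
  · split at h
    · split at h
      · split at h
        · split at h
          · rename_i hop o1 a1 r1 r2 h1 o2 a2 r3 r4 h2
            simp only [Option.some.injEq, Prod.mk.injEq] at h
            obtain ⟨hv, rfl⟩ := h
            obtain ⟨d1, ds1, e1, hd1, hds1, -, rfl⟩ := pvParseNum_some h1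
            obtain ⟨d2, ds2, e2, hd2, hds2, -, rfl⟩ := pvParseNum_some h2
            refine ⟨d1, ds1, d2, ds2, hop, ?_, hd1, hds1, hd2, hds2, hv.symm⟩
            conv_lhs => rw [← List.take_append_drop 4 l]
            rw [e1, e2]
            simp
          · simp at h
        · simp at h
      · simp at h
    · simp at h
  · simp at h

theorem pvTryCall_compute (op : List Char) (d1 : Char) (x : List Char) (d2 : Char)
    (y r4 : List Char) (hop : op = ['a','d','d','('] ∨ op = ['m','u','l','('])
    (h1 : '1' ≤ d1 ∧ d1 ≤ '9') (hx : ∀ c ∈ x, '0' ≤ c ∧ c ≤ '9')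
    (h2 : '1' ≤ d2 ∧ d2 ≤ '9') (hy : ∀ c ∈ y, '0' ≤ c ∧ c ≤ '9') :
    pvTryCall (op ++ (d1 :: x) ++ ',' :: (d2 :: y) ++ ')' :: r4) =
      some (PySem.Int.toChars (if op = ['a','d','d','('] then
        pvIntA (d1 :: x) + pvIntA (d2 :: y) else pvIntA (d1 :: x) * pvIntA (d2 :: y)), r4) := by
  have hlen : op.length = 4 := by rcases hop with rfl | rfl <;> rfl
  have e : op ++ (d1 :: x) ++ ',' :: (d2 :: y) ++ ')' :: r4 =
      op ++ ((d1 :: x) ++ (',' :: ((d2 :: y) ++ ')' :: r4))) := by simp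
  rw [e]
  have ht4 := List.take_left' (l₂ := (d1 :: x) ++ (',' :: ((d2 :: y) ++ ')' :: r4))) hlen
  have hd4 := List.drop_left' (l₂ := (d1 :: x) ++ (',' :: ((d2 :: y) ++ ')' :: r4))) hlen
  simp only [pvTryCall, ht4, hd4]
  rw [if_pos hop]
  rw [pvParseNum_compute d1 x _ h1 hx (by intro c r' he; cases he; decide)]
  simp only
  rw [pvParseNum_compute d2 y (')' :: r4) h2 hy (by intro c r' he; cases he; decide)]
  rfl

-- ---- A-side: validity of the canonical expression ----

theorem pvNotMem {z : Char} {ds : List Char} (hds : ∀ c ∈ ds, '0' ≤ c ∧ c ≤ '9')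
    (hz : z.toNat < 48) : z ∉ ds :=
  fun hm => absurd (pvDigitBounds (hds z hm)).1 (by omega)

theorem pvIsIn_false {z : Char} {ds : List Char} (hds : ∀ c ∈ ds, '0' ≤ c ∧ c ≤ '9')
    (hz : z.toNat < 48) : PySem.Chars.isIn [z] ds = false := by
  rw [PySem.Chars.isIn_eq_false_iff]
  intro hinf
  exact pvNotMem hds hz (hinf.sublist.subset (by simp))

theorem pvStrIsdigit_true {ds : List Char} (hne : ds ≠ []) (hds : ∀ c ∈ ds, '0' ≤ c ∧ c ≤ '9') :
    PySem.Chars.strIsdigit ds = true := by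
  simp only [PySem.Chars.strIsdigit, PySem.Chars.isdigit, Bool.and_eq_true, List.all_eq_true]
  refine ⟨by simpa using hne, fun c hc => ?_⟩
  simp [(hds c hc).1, (hds c hc).2]

theorem pvValid_canonical (op : List Char) (d1 : Char) (x : List Char) (d2 : Char) (y : List Char)
    (hop : op = ['a','d','d','('] ∨ op = ['m','u','l','('])
    (h1 : '1' ≤ d1 ∧ d1 ≤ '9') (hx : ∀ c ∈ x, '0' ≤ c ∧ c ≤ '9')
    (h2 : '1' ≤ d2 ∧ d2 ≤ '9') (hy : ∀ c ∈ y, '0' ≤ c ∧ c ≤ '9') :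
    pvValidA (op ++ (d1 :: x) ++ ',' :: (d2 :: y) ++ [')']) = true := by
  have hX : ∀ c ∈ d1 :: x, '0' ≤ c ∧ c ≤ '9' := by
    intro z hz
    rcases List.mem_cons.mp hz with rfl | hz
    · exact ⟨le_trans (by decide) h1.1, h1.2⟩
    · exact hx z hz
  have hY : ∀ c ∈ d2 :: y, '0' ≤ c ∧ c ≤ '9' := by
    intro z hz
    rcases List.mem_cons.mp hz with rfl | hz
    · exact ⟨le_trans (by decide) h2.1, h2.2⟩
    · exact hy z hz
  have hne1 : d1 ≠ '0' := by intro he; rw [he] at h1; exact absurd (pvCharLe.mp h1.1) (by decide)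
  have hne2 : d2 ≠ '0' := by intro he; rw [he] at h2; exact absurd (pvCharLe.mp h2.1) (by decide)
  have hpos1 := pvIntA_pos h1 hx
  have hpos2 := pvIntA_pos h2 hy
  have key : ∀ o : List Char, o = ['a','d','d','('] ∨ o = ['m','u','l','('] →
      (PySem.Chars.startswith (o ++ (d1 :: x) ++ ',' :: (d2 :: y) ++ [')']) ['a','d','d','('] ||
       PySem.Chars.startswith (o ++ (d1 :: x) ++ ',' :: (d2 :: y) ++ [')']) ['m','u','l','(']) = true := by
    intro o ho
    rcases ho with rfl | rfl <;> simp [PySem.Chars.startswith, List.isPrefixOf]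
  have hend : ∀ o : List Char, PySem.Chars.endswith (o ++ (d1 :: x) ++ ',' :: (d2 :: y) ++ [')']) [')'] = true := by
    intro o
    rw [PySem.Chars.endswith, List.isSuffixOf_iff_suffix]
    exact ⟨o ++ (d1 :: x) ++ ',' :: (d2 :: y), by simp⟩
  have hdrop : ∀ o : List Char, o.length = 4 →
      (o ++ (d1 :: x) ++ ',' :: (d2 :: y) ++ [')']).drop 4 = (d1 :: x) ++ ',' :: (d2 :: y) ++ [')'] := by
    intro o ho
    rw [show o ++ (d1 :: x) ++ ',' :: (d2 :: y) ++ [')'] = o ++ ((d1 :: x) ++ ',' :: (d2 :: y) ++ [')']) by simp]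
    exact List.drop_left' ho
  have hcontent : ((d1 :: x) ++ ',' :: (d2 :: y) ++ [')']).dropLast = (d1 :: x) ++ ',' :: (d2 :: y) := by
    rw [show (d1 :: x) ++ ',' :: (d2 :: y) ++ [')'] = ((d1 :: x) ++ ',' :: (d2 :: y)) ++ [')'] by simp]
    exact List.dropLast_concat
  have hsplit := pvSplit_pair (d1 :: x) (d2 :: y) (pvNotMem hX (by decide)) (pvNotMem hY (by decide))
  have hlen : ∀ o : List Char, o = ['a','d','d','('] ∨ o = ['m','u','l','('] → o.length = 4 := by
    rintro o (rfl | rfl) <;> rfl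
  unfold pvValidA
  rw [key op hop, hend op]
  simp only [Bool.not_true, Bool.or_self]
  rw [pvSlice_4_neg1, hdrop op (hlen op hop), hcontent, hsplit]
  simp only
  rw [pvIsIn_false hX (by decide), pvIsIn_false hY (by decide),
      pvIsIn_false hX (by decide), pvIsIn_false hY (by decide),
      pvIsIn_false hX (by decide), pvIsIn_false hY (by decide)]
  simp only [List.isEmpty_cons, Bool.or_self, List.getD_cons_zero]
  rw [pvStrIsdigit_true (by simp) hX, pvStrIsdigit_true (by simp) hY]
  simp [hne1, hne2]
  omega

-- ---- A-side: the shape forced by a passed validation ----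

theorem pvStrIsdigit_inv {ds : List Char} (h : PySem.Chars.strIsdigit ds = true) :
    ds ≠ [] ∧ ∀ c ∈ ds, '0' ≤ c ∧ c ≤ '9' := by
  simp only [PySem.Chars.strIsdigit, PySem.Chars.isdigit, Bool.and_eq_true, List.all_eq_true] at h
  refine ⟨by simpa using h.1, fun c hc => ?_⟩
  have := h.2 c hc
  simp only [decide_eq_true_eq] at this
  exact this

theorem pvShape_of_valid {l : List Char} {k : Nat}
    (h4 : 4 < l.length) (hk1 : 1 ≤ k) (hk : k ≤ l.length - 4)
    (hvalid : pvValidA (l.take (4 + k)) = true) :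
    ∃ d1 x d2 y,
      l = l.take 4 ++ (d1 :: x) ++ ',' :: (d2 :: y) ++ ')' :: l.drop (4 + k) ∧
      ('1' ≤ d1 ∧ d1 ≤ '9') ∧ (∀ c ∈ x, '0' ≤ c ∧ c ≤ '9') ∧
      ('1' ≤ d2 ∧ d2 ≤ '9') ∧ (∀ c ∈ y, '0' ≤ c ∧ c ≤ '9') := by
  have hexpr_len : (l.take (4 + k)).length = 4 + k := by
    simp only [List.length_take]; omega
  unfold pvValidA at hvalid
  split at hvalid
  · exact absurd hvalid (by simp)
  · rename_i hC
    rw [pvSlice_4_neg1] at hvalid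
    dsimp only at hvalid
    split at hvalid
    case h_2 => exact absurd hvalid (by simp)
    case h_1 X Y heq =>
      split at hvalid
      · exact absurd hvalid (by simp)
      split at hvalid
      · exact absurd hvalid (by simp)
      split at hvalid
      · exact absurd hvalid (by simp)
      split at hvalid
      · exact absurd hvalid (by simp)
      split at hvalid
      · exact absurd hvalid (by simp)
      rename_i hEmpty hIn hlz hdig hpos
      simp at hC hlz hdig hpos
      obtain ⟨-, hend⟩ := hC
      obtain ⟨hdX, hdY⟩ := hdig
      obtain ⟨hposX, hposY⟩ := hpos
      obtain ⟨hlzX, hlzY⟩ := hlz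
      obtain ⟨hXne, hXdig⟩ := pvStrIsdigit_inv hdX
      obtain ⟨hYne, hYdig⟩ := pvStrIsdigit_inv hdY
      -- split structure of the content
      obtain ⟨hc1, hcx, hcy⟩ := pvSplit_eq_pair heq
      -- leading-zero analysis
      obtain ⟨dX, X', rfl⟩ : ∃ d t, X = d :: t := by
        cases X with
        | nil => exact absurd rfl hXne
        | cons a b => exact ⟨a, b, rfl⟩
      obtain ⟨dY, Y', rfl⟩ : ∃ d t, Y = d :: t := by
        cases Y with
        | nil => exact absurd rfl hYne
        | cons a b => exact ⟨a, b, rfl⟩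
      have hdx0 : dX ≠ '0' := by
        intro he
        cases X' with
        | nil => rw [he] at hposX; exact absurd hposX (by decide)
        | cons a b => exact hlzX (by simp) (by simp [he])
      have hdy0 : dY ≠ '0' := by
        intro he
        cases Y' with
        | nil => rw [he] at hposY; exact absurd hposY (by decide)
        | cons a b => exact hlzY (by simp) (by simp [he])
      have hd1 := pvDigitOne (hXdig dX (by simp)) hdx0
      have hd2 := pvDigitOne (hYdig dY (by simp)) hdy0
      -- suffix structure: the expression ends in ')'
      rw [PySem.Chars.endswith, List.isSuffixOf_iff_suffix] at hend
      obtain ⟨t, ht⟩ := hend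
      have htlen : t.length + 1 = 4 + k := by
        rw [← hexpr_len, ← ht]; simp
      have hdrop4 : (l.take (4 + k)).drop 4 = t.drop 4 ++ [')'] := by
        rw [← ht, List.drop_append_of_le_length (by omega)]
      have hcontent : t.drop 4 = (dX :: X') ++ ',' :: (dY :: Y') := by
        rw [← hc1, hdrop4, List.dropLast_concat]
      have htake4 : t.take 4 = l.take 4 := by
        have e1 : (t ++ [')']).take 4 = t.take 4 := List.take_append_of_le_length (by omega)
        have e2 : (l.take (4 + k)).take 4 = l.take 4 := by
          rw [List.take_take]
          congr 1
          omega
        rw [← e2, ← ht, e1]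
      refine ⟨dX, X', dY, Y', ?_, hd1, fun c hc => hXdig c (List.mem_cons_of_mem _ hc),
        hd2, fun c hc => hYdig c (List.mem_cons_of_mem _ hc)⟩
      conv_lhs => rw [← List.take_append_drop (4 + k) l, ← ht, ← List.take_append_drop 4 t, htake4, hcontent]
      simp

-- ---- the two step lemmas and the main induction ----

theorem pvConsDigit {d : Char} {x : List Char} (hd : '1' ≤ d ∧ d ≤ '9')
    (hx : ∀ c ∈ x, '0' ≤ c ∧ c ≤ '9') : ∀ c ∈ d :: x, '0' ≤ c ∧ c ≤ '9' := by
  intro z hz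
  rcases List.mem_cons.mp hz with rfl | hz
  · exact ⟨le_trans (by decide) hd.1, hd.2⟩
  · exact hx z hz

theorem pvNoParen {d1 d2 : Char} {x y : List Char} (h1 : '1' ≤ d1 ∧ d1 ≤ '9')
    (hx : ∀ c ∈ x, '0' ≤ c ∧ c ≤ '9') (h2 : '1' ≤ d2 ∧ d2 ≤ '9')
    (hy : ∀ c ∈ y, '0' ≤ c ∧ c ≤ '9') :
    ∀ c ∈ (d1 :: x) ++ ',' :: (d2 :: y), c ≠ '(' ∧ c ≠ ')' := by
  intro z hz
  have hdig : ('0' ≤ z ∧ z ≤ '9') ∨ z = ',' := by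
    rcases List.mem_append.mp hz with hz | hz
    · exact Or.inl (pvConsDigit h1 hx z hz)
    · rcases List.mem_cons.mp hz with rfl | hz
      · exact Or.inr rfl
      · exact Or.inl (pvConsDigit h2 hy z hz)
  rcases hdig with hd | rfl
  · exact ⟨pvDigitNe hd (by decide), pvDigitNe hd (by decide)⟩
  · exact ⟨by decide, by decide⟩

theorem pvRunA_step_some {c : Char} {cs v rest : List Char}
    (h : pvTryCall (c :: cs) = some (v, rest)) :
    pvRunA (c :: cs) = v :: pvRunA rest := by
  obtain ⟨d1, x, d2, y, hop, hshape, h1, hx, h2, hy, hv⟩ := pvTryCall_some h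
  have hT4 : ((c :: cs).take 4).length = 4 := by rcases hop with he | he <;> rw [he] <;> rfl
  have hdrop : (c :: cs).drop 4 = (d1 :: x) ++ ',' :: (d2 :: y) ++ ')' :: rest := by
    conv_lhs => rw [hshape]
    rw [show (c :: cs).take 4 ++ (d1 :: x) ++ ',' :: (d2 :: y) ++ ')' :: rest =
      (c :: cs).take 4 ++ ((d1 :: x) ++ ',' :: (d2 :: y) ++ ')' :: rest) by simp]
    exact List.drop_left' hT4
  have hscan : pvScanA ((c :: cs).drop 4) 1 = (x.length + y.length + 4, 0) := by
    rw [hdrop, show (d1 :: x) ++ ',' :: (d2 :: y) ++ ')' :: rest =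
      ((d1 :: x) ++ ',' :: (d2 :: y)) ++ ')' :: rest by simp]
    rw [show (1 : Nat) = 0 + 1 by rfl, pvScan_noparen _ _ 0 (pvNoParen h1 hx h2 hy), pvScan_close]
    simp only [List.length_append, List.length_cons, Prod.mk.injEq]
    exact ⟨by omega, trivial⟩
  have hlen : 4 < (c :: cs).length := by
    rw [hshape]
    simp only [List.length_append, List.length_cons, hT4]
    omega
  have hexpr : (c :: cs).take (4 + (x.length + y.length + 4)) =
      (c :: cs).take 4 ++ (d1 :: x) ++ ',' :: (d2 :: y) ++ [')'] := by
    conv_lhs => rw [hshape]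
    rw [show (c :: cs).take 4 ++ (d1 :: x) ++ ',' :: (d2 :: y) ++ ')' :: rest =
      ((c :: cs).take 4 ++ (d1 :: x) ++ ',' :: (d2 :: y) ++ [')']) ++ rest by simp]
    rw [List.take_left' (by simp only [List.length_append, List.length_cons, List.length_nil, hT4]; omega)]
  have htail : (c :: cs).drop (4 + (x.length + y.length + 4)) = rest := by
    conv_lhs => rw [hshape]
    rw [show (c :: cs).take 4 ++ (d1 :: x) ++ ',' :: (d2 :: y) ++ ')' :: rest =
      ((c :: cs).take 4 ++ (d1 :: x) ++ ',' :: (d2 :: y) ++ [')']) ++ rest by simp]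
    rw [List.drop_left' (by simp only [List.length_append, List.length_cons, List.length_nil, hT4]; omega)]
  have hvalid : pvValidA ((c :: cs).take 4 ++ (d1 :: x) ++ ',' :: (d2 :: y) ++ [')']) = true :=
    pvValid_canonical _ d1 x d2 y hop h1 hx h2 hy
  have hcontent : PySem.List.slice ((c :: cs).take 4 ++ (d1 :: x) ++ ',' :: (d2 :: y) ++ [')'])
      (some 4) (some (-1)) = (d1 :: x) ++ ',' :: (d2 :: y) := by
    rw [pvSlice_4_neg1]
    rw [show (c :: cs).take 4 ++ (d1 :: x) ++ ',' :: (d2 :: y) ++ [')'] =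
      (c :: cs).take 4 ++ ((d1 :: x) ++ ',' :: (d2 :: y) ++ [')']) by simp]
    rw [List.drop_left' hT4]
    rw [show (d1 :: x) ++ ',' :: (d2 :: y) ++ [')'] =
      ((d1 :: x) ++ ',' :: (d2 :: y)) ++ [')'] by simp]
    exact List.dropLast_concat
  have hsplit := pvSplit_pair (d1 :: x) (d2 :: y)
    (pvNotMem (pvConsDigit h1 hx) (by decide)) (pvNotMem (pvConsDigit h2 hy) (by decide))
  rcases hop with hopc | hopc
  · rw [pvRunA]
    rw [if_pos ⟨hlen, hopc⟩]
    simp only [hscan, hexpr, hvalid, hcontent, hsplit, htail, if_true]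
    rw [hv, if_pos hopc]
    rfl
  · rw [pvRunA]
    rw [if_neg (by
      rintro ⟨-, he⟩
      rw [hopc] at he
      simp at he)]
    rw [if_pos ⟨hlen, hopc⟩]
    simp only [hscan, hexpr, hvalid, hcontent, hsplit, htail, if_true]
    rw [hv, if_neg (by rw [hopc]; simp)]
    rfl

theorem pvRunA_none_aux {c : Char} {cs : List Char} (h : pvTryCall (c :: cs) = none)
    (hop : (c :: cs).take 4 = ['a','d','d','('] ∨ (c :: cs).take 4 = ['m','u','l','('])
    (h4 : 4 < (c :: cs).length)
    (hdep : (pvScanA ((c :: cs).drop 4) 1).2 = 0)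
    (hval : pvValidA ((c :: cs).take (4 + (pvScanA ((c :: cs).drop 4) 1).1)) = true) : False := by
  have hsc : pvScanA ((c :: cs).drop 4) 1 = ((pvScanA ((c :: cs).drop 4) 1).1, 0) := by
    rw [← hdep]
  have hk1 : 1 ≤ (pvScanA ((c :: cs).drop 4) 1).1 := pvScan_pos hsc
  have hk : (pvScanA ((c :: cs).drop 4) 1).1 ≤ (c :: cs).length - 4 := by
    have := pvScan_len ((c :: cs).drop 4) 1
    simpa using this
  obtain ⟨d1, x, d2, y, hshape, h1, hx, h2, hy⟩ := pvShape_of_valid h4 hk1 hk hval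
  have := pvTryCall_compute ((c :: cs).take 4) d1 x d2 y ((c :: cs).drop (4 + (pvScanA ((c :: cs).drop 4) 1).1)) hop h1 hx h2 hy
  rw [← hshape] at this
  rw [this] at h
  simp at h

theorem pvRunA_step_none {c : Char} {cs : List Char} (h : pvTryCall (c :: cs) = none) :
    pvRunA (c :: cs) = [c] :: pvRunA cs := by
  rw [pvRunA]
  split_ifs with hA hM
  · dsimp only
    by_cases hdep : (pvScanA ((c :: cs).drop 4) 1).2 = 0
    · by_cases hval : pvValidA ((c :: cs).take (4 + (pvScanA ((c :: cs).drop 4) 1).1)) = true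
      · exact absurd hval (fun hv => pvRunA_none_aux h (Or.inl hA.2) hA.1 hdep hv)
      · rw [if_pos hdep, if_neg hval]
    · rw [if_neg hdep]
  · dsimp only
    by_cases hdep : (pvScanA ((c :: cs).drop 4) 1).2 = 0
    · by_cases hval : pvValidA ((c :: cs).take (4 + (pvScanA ((c :: cs).drop 4) 1).1)) = true
      · exact absurd hval (fun hv => pvRunA_none_aux h (Or.inr hM.2) hM.1 hdep hv)
      · rw [if_pos hdep, if_neg hval]
    · rw [if_neg hdep]
  · rfl

theorem pvRun_eq (l : List Char) : pvRunA l = pvRunB l := by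
  induction l using pvRunB.induct with
  | case1 => rw [pvRunA, pvRunB]
  | case2 c cs vr h ih =>
    obtain ⟨v, rest⟩ := vr
    rw [pvRunA_step_some h, ih]
    conv_rhs => rw [pvRunB]
    split
    · rename_i vr' heq
      rw [h] at heq
      cases heq
      rfl
    · rename_i heq
      rw [h] at heq
      cases heq
  | case3 c cs h ih =>
    rw [pvRunA_step_none h, ih]
    conv_rhs => rw [pvRunB]
    split
    · rename_i vr' heq
      rw [h] at heq
      cases heq
    · rfl

-- ===== VERDICT (by name: the statement is the Claim_ definition above) =====
theorem evaluate_spec : Claim_equal_evaluate := by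
  intro data _
  unfold Spec_evaluate evaluate evaluate_alt
  rw [pvRun_eq]
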